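-- pv_equiv track=rewrite | github.com/jayavardhan4546/DNA-Encryption | Encryptoin.py | add_to_binary_line
-- ===== SOURCE A (Python) =====
-- def add_to_binary_line(line, number):
--     result = []
--     current_code = ""
--
--     for char in line:
--         if char in '01':
--             current_code += char
--         elif char.isspace():
--             if current_code:
--                 # Ensure that the input strings represent valid binary numbers
--                 if not all(bit in '01' for bit in current_code):
--                     raise ValueError("Invalid binary input")
--
--                 # Convert binary string to integer, add the number, and then convert back to binary
--                 result.append(bin(int(current_code, 2) + number)[2:])
--                 current_code = ""
--         else:
--             raise ValueError("Invalid character in the input")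
--
--     if current_code:
--         if not all(bit in '01' for bit in current_code):
--             raise ValueError("Invalid binary input")
--         result.append(bin(int(current_code, 2) + number)[2:])
--
--     return result
-- ===== SOURCE B (Python) =====
-- def add_to_binary_line(line, number):
--     result = []
--     for token in line.split():
--         for ch in token:
--             if ch not in '01':
--                 raise ValueError("Invalid character in the input")
--         result.append(bin(int(token, 2) + number)[2:])
--     return result
-- ===== Notes on version B (the rewrite author's own statement) =====
-- stated objective: simpler
-- what changed: B replaces A's character-by-character state machine (manual token accumulator flushed at whitespace) with a split-then-process decomposition: line.split() yields the tokens up front, then each token is validated and converted.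
import Mathlib
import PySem

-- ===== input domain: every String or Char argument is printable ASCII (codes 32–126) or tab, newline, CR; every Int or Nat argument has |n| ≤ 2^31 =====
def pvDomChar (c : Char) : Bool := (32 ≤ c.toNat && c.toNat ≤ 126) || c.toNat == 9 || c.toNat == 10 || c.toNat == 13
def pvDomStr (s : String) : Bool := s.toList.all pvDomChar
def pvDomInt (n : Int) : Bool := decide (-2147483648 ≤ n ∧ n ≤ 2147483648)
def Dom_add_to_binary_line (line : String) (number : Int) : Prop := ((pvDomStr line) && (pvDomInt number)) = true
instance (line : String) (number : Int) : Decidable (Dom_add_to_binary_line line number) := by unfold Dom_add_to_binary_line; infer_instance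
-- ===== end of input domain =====

-- B replaces A's char-by-char tokenizer/state machine with split-then-process over the tokens (objective: simpler).


-- shared by both ports: the expression `bin(int(cs, 2) + number)[2:]` appearing verbatim in both Pythons
-- (int(cs,2) never raises on the inputs Pre_ admits, so getD 0 is never taken there)
def pvEncode (number : Int) (cs : List Char) : String :=
  String.ofList (PySem.List.slice (PySem.Int.toBinChars0b ((PySem.Int.ofCharsBase? cs 2).getD 0 + number)) (some 2) none)

-- ===== PORT A =====
-- A's char loop; state = (result, current_code); both `raise ValueError` sites are modeled by
-- returning the accumulated result (Pre_ excludes exactly those inputs).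
def pvGoA (number : Int) : List Char → List String → List Char → List String
  | [], res, cur =>
      if cur ≠ [] then
        if cur.all (fun b => b == '0' || b == '1') then res ++ [pvEncode number cur]
        else res  -- raise ValueError("Invalid binary input")  (dead branch, as in A)
      else res
  | c :: cs, res, cur =>
      if c == '0' || c == '1' then pvGoA number cs res (cur ++ [c])
      else if PySem.Chars.isspace c then
        if cur ≠ [] then
          if cur.all (fun b => b == '0' || b == '1') then pvGoA number cs (res ++ [pvEncode number cur]) []
          else res  -- raise ValueError("Invalid binary input")  (dead branch, as in A)
        else pvGoA number cs res cur
      else res  -- raise ValueError("Invalid character in the input")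

def add_to_binary_line (line : String) (number : Int) : List String :=
  pvGoA number line.toList [] []

-- ===== PORT B =====
-- B's token loop; the inner per-char validation loop (raise on a char not in '01') is the `all` test,
-- with the raise modeled by returning the accumulated result (Pre_ excludes those inputs).
def pvGoB (number : Int) : List String → List String → List String
  | [], res => res
  | tok :: toks, res =>
      if tok.toList.all (fun ch => ch == '0' || ch == '1') then
        pvGoB number toks (res ++ [pvEncode number tok.toList])
      else res  -- raise ValueError("Invalid character in the input")

def add_to_binary_line_alt (line : String) (number : Int) : List String :=
  pvGoB number (PySem.Str.split₀ line) []

-- ===== PRECONDITION & SPEC =====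
-- Pre_ excludes exactly the inputs on which A raises ValueError: a character other than '0', '1' or whitespace.
def Pre_add_to_binary_line (line : String) (number : Int) : Prop :=
  line.toList.all (fun c => c == '0' || c == '1' || PySem.Chars.isspace c) = true
instance (line : String) (number : Int) : Decidable (Pre_add_to_binary_line line number) := by
  unfold Pre_add_to_binary_line; infer_instance
def pvWitness_add_to_binary_line : String × Int := ("101 1\t01", 3)

def Spec_add_to_binary_line (line : String) (number : Int) (out : List String) : Prop := out = add_to_binary_line_alt line number
instance (line : String) (number : Int) (out : List String) : Decidable (Spec_add_to_binary_line line number out) := by unfold Spec_add_to_binary_line; infer_instance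

-- ===== CLAIM (what is proved, stated in full; the proofs are below) =====
def Claim_equal_add_to_binary_line : Prop := ∀ (line : String) (number : Int), Dom_add_to_binary_line line number → Pre_add_to_binary_line line number → Spec_add_to_binary_line line number (add_to_binary_line line number)

-- ===== LEMMAS AND PROOFS =====

-- a plain left-to-right tokenizer, the common ground between A's state machine and split₀'s accumulator recursion
def pvTkz : List Char → List Char → List (List Char)
  | cur, [] => if cur = [] then [] else [cur]
  | cur, c :: cs =>
      if PySem.Chars.isspace c then (if cur = [] then pvTkz [] cs else cur :: pvTkz [] cs)
      else pvTkz (cur ++ [c]) cs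

-- pvGoB over the underlying char lists
def pvGoBL (number : Int) : List (List Char) → List String → List String
  | [], res => res
  | t :: ts, res =>
      if t.all (fun ch => ch == '0' || ch == '1') then pvGoBL number ts (res ++ [pvEncode number t])
      else res

theorem pvGoB_map (number : Int) (ts : List (List Char)) (res : List String) :
    pvGoB number (ts.map String.ofList) res = pvGoBL number ts res := by
  induction ts generalizing res with
  | nil => rfl
  | cons t ts ih => simp [pvGoB, pvGoBL, ih]

theorem pvSplit₀_go_spec (cs : List Char) : ∀ (cur : List Char) (acc : List (List Char)),
    PySem.Chars.split₀.go cs cur acc = acc.reverse ++ pvTkz cur.reverse cs := by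
  induction cs with
  | nil =>
      intro cur acc
      by_cases h : cur = [] <;>
        simp [PySem.Chars.split₀.go, pvTkz, h, List.isEmpty_iff]
  | cons c cs ih =>
      intro cur acc
      by_cases hs : PySem.Chars.isspace c = true
      · by_cases h : cur = []
        · simp [PySem.Chars.split₀.go, pvTkz, hs, h, ih]
        · simp [PySem.Chars.split₀.go, pvTkz, hs, h, ih]
      · simp [PySem.Chars.split₀.go, pvTkz, hs, ih]

theorem pvGoA_eq_goBL (number : Int) (cs : List Char) :
    ∀ (cur : List Char) (res : List String),
    (∀ c ∈ cs, c = '0' ∨ c = '1' ∨ PySem.Chars.isspace c = true) →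
    (∀ c ∈ cur, c = '0' ∨ c = '1') →
    pvGoA number cs res cur = pvGoBL number (pvTkz cur cs) res := by
  induction cs with
  | nil =>
      intro cur res _ hcur
      by_cases h : cur = []
      · simp [pvGoA, pvTkz, h, pvGoBL]
      · have hall : cur.all (fun b => b == '0' || b == '1') = true := by
          simp only [List.all_eq_true]
          intro c hc
          rcases hcur c hc with h | h <;> simp [h]
        simp [pvGoA, pvTkz, h, pvGoBL, hall]
  | cons c cs ih =>
      intro cur res hcs hcur
      have hc := hcs c (by simp)
      have hcs' : ∀ c ∈ cs, c = '0' ∨ c = '1' ∨ PySem.Chars.isspace c = true := by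
        intro x hx; exact hcs x (by simp [hx])
      by_cases h01 : c = '0' ∨ c = '1'
      · have hb : (c == '0' || c == '1') = true := by
          rcases h01 with h | h <;> simp [h]
        have hns : PySem.Chars.isspace c = false := by
          rcases h01 with h | h <;> simp [h] <;> decide
        have hcur' : ∀ x ∈ cur ++ [c], x = '0' ∨ x = '1' := by
          intro x hx
          rcases List.mem_append.mp hx with hx | hx
          · exact hcur x hx
          · simp at hx; subst hx; exact h01
        simp [pvGoA, pvTkz, hb, hns, ih _ _ hcs' hcur']
      · have hs : PySem.Chars.isspace c = true := by
          rcases hc with h | h | h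
          · exact absurd (Or.inl h) h01
          · exact absurd (Or.inr h) h01
          · exact h
        have hb : (c == '0' || c == '1') = false := by
          simp only [Bool.or_eq_false_iff, beq_eq_false_iff_ne, ne_eq]
          exact ⟨fun h => h01 (Or.inl h), fun h => h01 (Or.inr h)⟩
        by_cases h : cur = []
        · subst h
          have e1 : pvGoA number (c :: cs) res [] = pvGoA number cs res [] := by
            simp [pvGoA, hb, hs]
          have e2 : pvTkz [] (c :: cs) = pvTkz [] cs := by simp [pvTkz, hs]
          rw [e1, e2]
          exact ih [] res hcs' (by simp)
        · have hall : cur.all (fun b => b == '0' || b == '1') = true := by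
            simp only [List.all_eq_true]
            intro x hx
            rcases hcur x hx with hh | hh <;> simp [hh]
          have e1 : pvGoA number (c :: cs) res cur
              = pvGoA number cs (res ++ [pvEncode number cur]) [] := by
            simp [pvGoA, hb, hs, h, hall]
          have e2 : pvTkz cur (c :: cs) = cur :: pvTkz [] cs := by simp [pvTkz, hs, h]
          rw [e1, e2]
          have e3 : pvGoBL number (cur :: pvTkz [] cs) res
              = pvGoBL number (pvTkz [] cs) (res ++ [pvEncode number cur]) := by
            simp [pvGoBL, hall]
          rw [e3]
          exact ih [] _ hcs' (by simp)

-- ===== VERDICT (by name: the statement is the Claim_ definition above) =====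
theorem add_to_binary_line_spec : Claim_equal_add_to_binary_line := by
  intro line number _ hpre
  unfold Spec_add_to_binary_line add_to_binary_line add_to_binary_line_alt
  have hval : ∀ c ∈ line.toList, c = '0' ∨ c = '1' ∨ PySem.Chars.isspace c = true := by
    have := hpre
    unfold Pre_add_to_binary_line at this
    simp only [List.all_eq_true] at this
    intro c hc
    have h := this c hc
    simp only [Bool.or_eq_true, beq_iff_eq] at h
    tauto
  rw [pvGoA_eq_goBL number line.toList [] [] hval (by simp)]
  rw [PySem.Str.split₀]
  rw [pvGoB_map number (PySem.Chars.split₀ line.toList) []]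
  rw [PySem.Chars.split₀, pvSplit₀_go_spec]
  simp
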